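-- pv_equiv track=rewrite | github.com/mayureshzende/CodeWars-Solutions | python/6kyu/odd_heavy.py | is_odd_heavy
-- ===== SOURCE A (Python) =====
-- def is_odd_heavy(arr):
--     if not len(arr):
--         return  False
--     odd = []
--     even = []
--
--     for ele in arr:
--         if ele % 2 == 0:
--             even.append(ele)
--         else:
--             odd.append(ele)
--
--
--     if not len(even):
--         return True
--
--     if not len(odd) :
--         return False
--
--     if len(even):
--         max_even = max(even)
--
--     for i,ele in enumerate(odd):
--         if max_even > odd[i]:
--             return False
--
--     return True
-- ===== SOURCE B (Python) =====
-- def is_odd_heavy(arr):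
--     if not arr:
--         return False
--     max_even = None
--     min_odd = None
--     for x in arr:
--         if x % 2 == 0:
--             if max_even is None or x > max_even:
--                 max_even = x
--         else:
--             if min_odd is None or x < min_odd:
--                 min_odd = x
--     if max_even is None:
--         return True
--     if min_odd is None:
--         return False
--     return min_odd > max_even
-- ===== Notes on version B (the rewrite author's own statement) =====
-- stated objective: alternative
-- what changed: Replaces A's build-two-lists-then-max-then-rescan structure with a single pass keeping only two scalar running extrema (max even, min odd) and a final threshold comparison.
import Mathlib
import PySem

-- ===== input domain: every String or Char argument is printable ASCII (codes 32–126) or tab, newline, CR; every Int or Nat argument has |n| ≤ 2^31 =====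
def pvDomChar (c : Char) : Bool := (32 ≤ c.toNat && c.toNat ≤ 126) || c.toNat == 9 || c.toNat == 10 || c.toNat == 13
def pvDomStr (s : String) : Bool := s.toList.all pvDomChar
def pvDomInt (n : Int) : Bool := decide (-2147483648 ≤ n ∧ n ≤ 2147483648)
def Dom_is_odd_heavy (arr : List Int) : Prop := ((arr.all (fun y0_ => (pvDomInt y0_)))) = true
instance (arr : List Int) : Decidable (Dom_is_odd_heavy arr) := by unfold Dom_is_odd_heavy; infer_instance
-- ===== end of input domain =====

-- B is an alternative single-pass implementation keeping two scalar running extrema instead of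
-- building the two partition lists; equivalence of the return value is proved on all inputs.

-- ===== PORT A =====
-- the partition loop of A: appends each element to the even or odd list
def pyAPartition : List Int → List Int × List Int → List Int × List Int
  | [], acc => acc
  | x :: t, acc =>
      if PySem.Int.mod x 2 = 0 then pyAPartition t (acc.1, acc.2 ++ [x])
      else pyAPartition t (acc.1 ++ [x], acc.2)

-- the final loop of A: early-return False when max_even > some odd element
def pyAScan (max_even : Int) : List Int → Bool
  | [] => true
  | x :: t => if max_even > x then false else pyAScan max_even t

def is_odd_heavy (arr : List Int) : Bool :=
  if arr.length = 0 then false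
  else
    let p := pyAPartition arr ([], [])
    if p.2.length = 0 then true
    else if p.1.length = 0 then false
    else
      match PySem.List.max? p.2 (fun y => y) with
      | some max_even => pyAScan max_even p.1
      | none => false  -- unreachable: p.2 is nonempty here

-- ===== PORT B =====
-- one step of B's single pass: update the running max-even / min-odd
def pyBStep (st : Option Int × Option Int) (x : Int) : Option Int × Option Int :=
  if PySem.Int.mod x 2 = 0 then
    match st.1 with
    | none => (some x, st.2)
    | some m => (some (if x > m then x else m), st.2)
  else
    match st.2 with
    | none => (st.1, some x)
    | some m => (st.1, some (if x < m then x else m))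

def is_odd_heavy_alt (arr : List Int) : Bool :=
  match arr with
  | [] => false
  | _ :: _ =>
    match arr.foldl pyBStep (none, none) with
    | (none, _) => true
    | (some _, none) => false
    | (some max_even, some min_odd) => decide (max_even < min_odd)

-- ===== PRECONDITION & SPEC =====
def Spec_is_odd_heavy (arr : List Int) (out : Bool) : Prop := out = is_odd_heavy_alt arr
instance (arr : List Int) (out : Bool) : Decidable (Spec_is_odd_heavy arr out) := by unfold Spec_is_odd_heavy; infer_instance

-- ===== CLAIM (what is proved, stated in full; the proofs are below) =====
def Claim_equal_is_odd_heavy : Prop := ∀ (arr : List Int), Dom_is_odd_heavy arr → Spec_is_odd_heavy arr (is_odd_heavy arr)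

-- ===== LEMMAS AND PROOFS =====

def pvIsEv (x : Int) : Bool := decide (PySem.Int.mod x 2 = 0)

lemma pyAPartition_eq (l : List Int) (o e : List Int) :
    pyAPartition l (o, e) =
      (o ++ l.filter (fun x => !pvIsEv x), e ++ l.filter pvIsEv) := by
  induction l generalizing o e with
  | nil => simp [pyAPartition]
  | cons x t ih =>
    by_cases h : Int.fmod x 2 = 0 <;>
      simp [pyAPartition, h, pvIsEv, ih, PySem.Int.mod]

lemma pyAScan_eq (m : Int) (l : List Int) :
    pyAScan m l = l.all (fun x => decide (m ≤ x)) := by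
  induction l with
  | nil => rfl
  | cons x t ih =>
    by_cases h : m > x
    · simp [pyAScan, h, not_le.mpr h]
    · simp [pyAScan, h, ih, not_lt.mp h]

-- B's fold, split into the two scalar folds over the filtered sublists
def pvOMax (st : Option Int) (x : Int) : Option Int :=
  match st with
  | none => some x
  | some m => some (if x > m then x else m)

def pvOMin (st : Option Int) (x : Int) : Option Int :=
  match st with
  | none => some x
  | some m => some (if x < m then x else m)

lemma pyBfold_eq (l : List Int) (st : Option Int × Option Int) :
    l.foldl pyBStep st =
      ((l.filter pvIsEv).foldl pvOMax st.1, (l.filter (fun x => !pvIsEv x)).foldl pvOMin st.2) := by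
  induction l generalizing st with
  | nil => simp
  | cons x t ih =>
    by_cases h : (2 : Int) ∣ x <;>
      cases st with
      | mk a b =>
        cases a <;> cases b <;>
          simp [pyBStep, h, pvIsEv, ih, pvOMax, pvOMin]

lemma pvOMax_fold_some (t : List Int) (m : Int) :
    t.foldl pvOMax (some m) = some (t.foldl max m) := by
  induction t generalizing m with
  | nil => rfl
  | cons x s ih =>
    have : pvOMax (some m) x = some (max m x) := by
      simp only [pvOMax, max_def, Option.some.injEq]
      split <;> split <;> omega
    simp [this, ih]

lemma pvOMin_fold_some (t : List Int) (m : Int) :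
    t.foldl pvOMin (some m) = some (t.foldl min m) := by
  induction t generalizing m with
  | nil => rfl
  | cons x s ih =>
    have : pvOMin (some m) x = some (min m x) := by
      simp only [pvOMin, min_def, Option.some.injEq]
      split <;> split <;> omega
    simp [this, ih]

lemma mod_ne_of_parity {a b : Int} (ha : pvIsEv a = true) (hb : pvIsEv b = false) : a ≠ b := by
  intro h; subst h; rw [ha] at hb; exact absurd hb (by decide)

theorem is_odd_heavy_spec : Claim_equal_is_odd_heavy := by
  intro arr _
  unfold Spec_is_odd_heavy
  cases arr with
  | nil => rfl
  | cons x t =>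
    simp only [is_odd_heavy, is_odd_heavy_alt, List.length_cons, pyAPartition_eq,
      pyBfold_eq, List.nil_append]
    have hne : (x :: t).length ≠ 0 := by simp
    set evens := (x :: t).filter pvIsEv with hev
    set odds := (x :: t).filter (fun y => !pvIsEv y) with hod
    cases hE : evens with
    | nil => simp
    | cons e es =>
      cases hO : odds with
      | nil => simp [pvOMax, pvOMax_fold_some]
      | cons o os =>
        have hmax : PySem.List.max? (e :: es) (fun y => y) = some (es.foldl max e) :=
          PySem.List.max?_id_cons e es
        simp only [List.length_cons, List.foldl_cons, pvOMax, pvOMin,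
          pvOMax_fold_some, pvOMin_fold_some, hmax]
        rw [if_neg (Nat.succ_ne_zero _), if_neg (Nat.succ_ne_zero _), if_neg (Nat.succ_ne_zero _)]
        -- goal: the A-side scan equals the B-side comparison
        set M := es.foldl max e with hM
        set mo := os.foldl min o with hmo
        rw [pyAScan_eq]
        -- facts about M and mo
        have hMmem : M ∈ e :: es := by
          have := PySem.List.max?_mem (xs := e :: es) (key := fun y => y) hmax
          simpa using this
        have hMev : pvIsEv M = true := by
          have : M ∈ evens := hE ▸ hMmem
          exact (List.mem_filter.mp (hev ▸ this)).2
        have hmin : PySem.List.min? (o :: os) (fun y => y) = some mo :=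
          PySem.List.min?_id_cons o os
        have hmomem : mo ∈ o :: os := by
          have := PySem.List.min?_mem (xs := o :: os) (key := fun y => y) hmin
          simpa using this
        have hmoodd : pvIsEv mo = false := by
          have : mo ∈ odds := hO ▸ hmomem
          have := List.mem_filter.mp (hod ▸ this)
          simpa using this.2
        have hmoMin : ∀ y ∈ o :: os, mo ≤ y := by
          intro y hy
          exact PySem.List.min?_isMin (xs := o :: os) (key := fun y => y) hmin y hy
        have hneq : M ≠ mo := mod_ne_of_parity hMev hmoodd
        by_cases h : M < mo
        · have hall : ∀ y ∈ o :: os, decide (M ≤ y) = true := by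
            intro y hy; exact decide_eq_true (le_trans (le_of_lt h) (hmoMin y hy))
          rw [List.all_eq_true.mpr hall]
          simp [h]
        · have hlt : mo < M := lt_of_le_of_ne (not_lt.mp h) (Ne.symm hneq)
          have hall : (o :: os).all (fun y => decide (M ≤ y)) = false := by
            rw [List.all_eq_false]
            exact ⟨mo, hmomem, by simpa using hlt⟩
          rw [hall]
          simp [h]
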